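-- pv_equiv track=rewrite | github.com/dsharpc/AdventOfCode | 2020/day6.py | get_num_questions_all
-- ===== SOURCE A (Python) =====
-- from collections import Counter
--
-- def get_num_questions_all(ques):
--     keys = 0
--     num_users = len(ques.split('\n'))
--     ques = ques.replace('\n','').strip()
--     counted = Counter(ques)
--     for k, v in counted.items():
--         if v == num_users:
--             keys+=1
--     return keys
-- ===== SOURCE B (Python) =====
-- def get_num_questions_all(ques):
--     num_users = len(ques.split('\n'))
--     s = sorted(ques.replace('\n', '').strip())
--     total = 0
--     i = 0
--     n = len(s)
--     while i < n:
--         j = i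
--         while j < n and s[j] == s[i]:
--             j += 1
--         if j - i == num_users:
--             total += 1
--         i = j
--     return total
-- ===== Notes on version B (the rewrite author's own statement) =====
-- stated objective: alternative
-- what changed: Replaces A's Counter hash-frequency table and items loop by sorting the cleaned string and counting equal-adjacent runs whose length equals the group size.
import Mathlib
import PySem

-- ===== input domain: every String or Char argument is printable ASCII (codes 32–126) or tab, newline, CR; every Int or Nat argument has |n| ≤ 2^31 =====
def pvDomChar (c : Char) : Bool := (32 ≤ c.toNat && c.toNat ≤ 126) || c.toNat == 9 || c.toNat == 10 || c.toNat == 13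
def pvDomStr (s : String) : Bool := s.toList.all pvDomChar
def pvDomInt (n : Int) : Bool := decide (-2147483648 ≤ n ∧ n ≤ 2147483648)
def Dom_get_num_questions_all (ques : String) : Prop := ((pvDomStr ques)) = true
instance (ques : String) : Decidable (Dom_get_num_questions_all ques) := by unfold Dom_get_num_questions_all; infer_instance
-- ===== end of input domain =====

-- B replaces A's Counter-based frequency filter by sort + run-length scan: same values, a different
-- algorithm of similar cost (objective: alternative, not claimed faster).

-- ===== PORT A =====
def get_num_questions_all (ques : String) : Int :=
  let keys : Int := 0
  let num_users : Int := ((PySem.Chars.splitOn ques.toList ['\n']).length : Int)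
  let cleaned := PySem.Str.strip (PySem.Str.replace ques "\n" "")
  let counted := PySem.Dict.counter cleaned.toList
  counted.items.foldl (fun keys kv => if kv.2 = num_users then keys + 1 else keys) keys

-- ===== PORT B =====
-- the outer while loop of Source B: consume one run of equal chars (inner while = takeWhile),
-- add 1 when the run length equals n, continue after the run (dropWhile)
def pvRunScan (n : Int) : List Char → Int
  | [] => 0
  | c :: rest =>
      (if ((1 + (rest.takeWhile (fun d => d == c)).length : Nat) : Int) = n then (1 : Int) else 0)
        + pvRunScan n (rest.dropWhile (fun d => d == c))
termination_by l => l.length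
decreasing_by
  simpa using Nat.lt_succ_of_le (List.length_dropWhile_le _ _)

def get_num_questions_all_alt (ques : String) : Int :=
  let num_users : Int := ((PySem.Chars.splitOn ques.toList ['\n']).length : Int)
  let s := PySem.List.sorted (PySem.Str.strip (PySem.Str.replace ques "\n" "")).toList (fun c => c) false
  pvRunScan num_users s

-- ===== PRECONDITION & SPEC =====
def Spec_get_num_questions_all (ques : String) (out : Int) : Prop := out = get_num_questions_all_alt ques
instance (ques : String) (out : Int) : Decidable (Spec_get_num_questions_all ques out) := by unfold Spec_get_num_questions_all; infer_instance

-- ===== CLAIM (what is proved, stated in full; the proofs are below) =====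
def Claim_equal_get_num_questions_all : Prop := ∀ (ques : String), Dom_get_num_questions_all ques → Spec_get_num_questions_all ques (get_num_questions_all ques)

-- ===== LEMMAS AND PROOFS =====

-- run-length scan of a (≤)-sorted list = number of distinct elements whose count equals n
theorem pvRunScan_eq (n : Int) (l : List Char) (h : l.Pairwise (· ≤ ·)) :
    pvRunScan n l
      = ((PySem.Set.ofList l).countP (fun c => decide ((l.count c : Int) = n)) : Int) := by
  induction hN : l.length using Nat.strong_induction_on generalizing l with
  | _ N ih =>
    match l, h with
    | [], _ => simp [pvRunScan, PySem.Set.ofList]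
    | c :: rest, h =>
      have hle : ∀ x ∈ rest, c ≤ x := fun x hx => (List.pairwise_cons.mp h).1 x hx
      have hrest : rest.Pairwise (· ≤ ·) := (List.pairwise_cons.mp h).2
      set tw := rest.takeWhile (fun d => d == c) with htw
      set dp := rest.dropWhile (fun d => d == c) with hdp
      have hsplit : tw ++ dp = rest := List.takeWhile_append_dropWhile
      have htwc : ∀ x ∈ tw, x = c := by
        intro x hx
        simpa using List.mem_takeWhile_imp hx
      have hdpp : dp.Pairwise (· ≤ ·) :=
        List.Pairwise.sublist ((List.dropWhile_sublist _).trans (List.sublist_cons_self c rest)) h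
      have hcdp : c ∉ dp := by
        intro hc
        obtain ⟨d, dtail, hdm⟩ := List.exists_cons_of_ne_nil (List.ne_nil_of_mem hc)
        have hdd : List.dropWhile (fun d => d == c) rest = d :: dtail := by rw [← hdp, hdm]
        have hdne' : d ≠ c := by
          have hne : List.dropWhile (fun d => d == c) rest ≠ [] := by simp [hdd]
          have := List.head_dropWhile_not (fun d => d == c) hne
          simp only [hdd, List.head_cons] at this
          simpa using this
        rw [hdm] at hc
        rcases List.mem_cons.mp hc with rfl | hc'
        · exact hdne' rfl
        · have h1 : d ≤ c := by
            rw [hdm] at hdpp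
            exact (List.pairwise_cons.mp hdpp).1 c hc'
          have h2 : c ≤ d := hle d (by rw [← hsplit, hdm]; exact List.mem_append_right _ List.mem_cons_self)
          exact hdne' (le_antisymm h1 h2)
      -- counts
      have hcount_c : (c :: rest).count c = 1 + tw.length := by
        rw [← hsplit]
        have h1 : tw.count c = tw.length := List.count_eq_length.mpr (by
          intro x hx; have := htwc x hx; simp [this])
        have h2 : dp.count c = 0 := List.count_eq_zero.mpr hcdp
        simp [List.count_append, h1, h2]
        omega
      have hcount_ne : ∀ x, x ≠ c → (c :: rest).count x = dp.count x := by
        intro x hx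
        rw [← hsplit]
        have h1 : tw.count x = 0 := List.count_eq_zero.mpr (by
          intro hmem; exact hx (htwc x hmem))
        simp only [List.count_cons, List.count_append, h1]
        have : ¬ (c = x) := fun hcx => hx hcx.symm
        simp [this]
      -- the distinct elements: ofList (c :: rest) is a permutation of c :: ofList dp
      have hperm : (PySem.Set.ofList (c :: rest)).Perm (c :: PySem.Set.ofList dp) := by
        rw [List.perm_ext_iff_of_nodup (PySem.Set.nodup_ofList _)
          (by simp [List.nodup_cons, PySem.Set.mem_ofList, hcdp, PySem.Set.nodup_ofList])]
        intro a
        simp only [PySem.Set.mem_ofList, List.mem_cons, ← hsplit, List.mem_append]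
        constructor
        · rintro (rfl | ha | ha)
          · exact Or.inl rfl
          · exact Or.inl (htwc a ha)
          · exact Or.inr ha
        · rintro (rfl | ha)
          · exact Or.inl rfl
          · exact Or.inr (Or.inr ha)
      have hdplen : dp.length < N := by
        have : dp.length ≤ rest.length := List.length_dropWhile_le _ _
        simp at hN
        omega
      have ihdp := ih dp.length hdplen dp hdpp rfl
      rw [pvRunScan, hperm.countP_eq]
      rw [List.countP_cons]
      have hcongr : (PySem.Set.ofList dp).countP (fun x => decide (((c :: rest).count x : Int) = n))
          = (PySem.Set.ofList dp).countP (fun x => decide ((dp.count x : Int) = n)) := by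
        apply List.countP_congr
        intro x hx
        have hxne : x ≠ c := fun hxc => hcdp (hxc ▸ (PySem.Set.mem_ofList _ _).mp hx)
        rw [hcount_ne x hxne]
      rw [hcongr]
      rw [← hdp, ← htw, ihdp, hcount_c]
      by_cases hn : ((1 + tw.length : Nat) : Int) = n
      · simp [hn]; omega
      · simp [hn]; omega

-- glue: A's Counter-items fold equals B's run scan of the sorted chars, for any char list
theorem pvCounterFold_eq_runScan (n : Int) (cs : List Char) :
    (PySem.Dict.counter cs).items.foldl (fun keys kv => if kv.2 = n then keys + 1 else keys) (0 : Int)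
      = pvRunScan n (PySem.List.sorted cs (fun c => c) false) := by
  rw [PySem.List.foldl_ite_add_one (p := fun kv : Char × Int => kv.2 = n)]
  rw [PySem.Dict.items_counter, List.countP_map]
  rw [pvRunScan_eq n _ (PySem.List.sorted_pairwise cs (fun c => c))]
  have hpermcs := PySem.List.sorted_perm cs (fun c => c) false
  have hsetperm : (PySem.Set.ofList (PySem.List.sorted cs (fun c => c) false)).Perm
      (PySem.Set.ofList cs) := by
    rw [List.perm_ext_iff_of_nodup (PySem.Set.nodup_ofList _) (PySem.Set.nodup_ofList _)]
    intro a
    simp [PySem.Set.mem_ofList, hpermcs.mem_iff]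
  rw [hsetperm.countP_eq]
  have hc : (PySem.Set.ofList cs).countP
        (fun x => decide (((PySem.List.sorted cs (fun c => c) false).count x : Int) = n))
      = (PySem.Set.ofList cs).countP (fun x => decide ((cs.count x : Int) = n)) := by
    apply List.countP_congr
    intro x _
    rw [hpermcs.count_eq]
  rw [hc]
  simp only [Function.comp_def, zero_add]

-- ===== VERDICT (by name: the statement is the Claim_ definition above) =====
theorem get_num_questions_all_spec : Claim_equal_get_num_questions_all := by
  intro ques _
  show get_num_questions_all ques = get_num_questions_all_alt ques
  unfold get_num_questions_all get_num_questions_all_alt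
  exact pvCounterFold_eq_runScan _ _
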